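-- pv_equiv track=rewrite | github.com/dmjone/dmjone | test/codevitas13/a5.py | rotate_face_perm
-- ===== SOURCE A (Python) =====
-- def identity_perm(M):
--     return list(range(M))
--
-- def ID(f, i, j, N):
--     """1-based f,i,j -> 0-based linear id"""
--     return (f - 1) * N * N + (i - 1) * N + (j - 1)
--
-- def rotate_face_perm(f, which, N):
--     """Rotate face f in place. which in {'CW','CCW','CW2'}."""
--     M = 6 * N * N
--     P = identity_perm(M)
--     for i in range(1, N + 1):
--         for j in range(1, N + 1):
--             if which == 'CW':
--                 ni, nj = j, N - i + 1
--             elif which == 'CCW':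
--                 ni, nj = N - j + 1, i
--             else:  # 180°
--                 ni, nj = N - i + 1, N - j + 1
--             dst = ID(f, ni, nj, N)
--             src = ID(f, i, j, N)
--             P[dst] = src
--     return P
-- ===== SOURCE B (Python) =====
-- def rotate_face_perm(f, which, N):
--     """Rotate face f of the permutation: build the face's grid of source ids,
--     rotate the whole grid with list idioms, then scatter it back into place."""
--     M = 6 * N * N
--     base = (f - 1) * N * N
--     grid = [[base + i * N + j for j in range(N)] for i in range(N)]
--     if which == 'CW':
--         rotated = [[row[r] for row in reversed(grid)] for r in range(N)]
--     elif which == 'CCW':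
--         rotated = [[row[N - 1 - r] for row in grid] for r in range(N)]
--     else:  # any other value: 180 degrees, as in the original's catch-all else
--         rotated = [row[::-1] for row in reversed(grid)]
--     P = list(range(M))
--     for r, row in enumerate(rotated):
--         for c, v in enumerate(row):
--             P[base + r * N + c] = v
--     return P
-- ===== Notes on version B (the rewrite author's own statement) =====
-- stated objective: idiomatic
-- what changed: B materialises the face as a 2D grid of source ids, rotates the whole grid with standard list idioms (column-pick / reversed rows) and scatters the flattened rotated grid back into the identity permutation, instead of A's per-cell 1-based destination-index arithmetic inside the double loop.
import Mathlib
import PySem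

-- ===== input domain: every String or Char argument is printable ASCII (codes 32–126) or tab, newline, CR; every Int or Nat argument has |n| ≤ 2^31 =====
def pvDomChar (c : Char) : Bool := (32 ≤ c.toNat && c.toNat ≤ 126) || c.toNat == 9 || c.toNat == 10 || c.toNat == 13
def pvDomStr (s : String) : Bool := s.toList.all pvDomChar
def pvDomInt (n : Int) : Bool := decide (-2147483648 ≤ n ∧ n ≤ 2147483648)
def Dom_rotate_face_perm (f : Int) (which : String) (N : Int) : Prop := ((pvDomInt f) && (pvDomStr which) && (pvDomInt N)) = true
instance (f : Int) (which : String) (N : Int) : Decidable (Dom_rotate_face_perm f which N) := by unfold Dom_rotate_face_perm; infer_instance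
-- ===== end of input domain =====

-- B rebuilds the face as a 2D grid, rotates the whole grid with list idioms and scatters it
-- back into the permutation, instead of A's per-cell destination-index arithmetic (objective: idiomatic).

-- ===== PORT A =====
-- helper ID(f, i, j, N) from A's module
def pvID (f i j N : Int) : Int := (f - 1) * N * N + (i - 1) * N + (j - 1)

def rotate_face_perm (f : Int) (which : String) (N : Int) : List Int :=
  let M := 6 * N * N
  let P := PySem.List.pyRange 0 M 1     -- identity_perm(M) = list(range(M))
  (PySem.List.pyRange 1 (N + 1) 1).foldl (fun P i =>
    (PySem.List.pyRange 1 (N + 1) 1).foldl (fun P j =>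
      let nij := if which == "CW" then (j, N - i + 1)
                 else if which == "CCW" then (N - j + 1, i)
                 else (N - i + 1, N - j + 1)
      let dst := pvID f nij.1 nij.2 N
      let src := pvID f i j N
      PySem.List.pySetD P dst src) P) P

-- ===== PORT B =====
def rotate_face_perm_alt (f : Int) (which : String) (N : Int) : List Int :=
  let M := 6 * N * N
  let base := (f - 1) * N * N
  let grid : List (List Int) :=
    (PySem.List.pyRange 0 N 1).map (fun i => (PySem.List.pyRange 0 N 1).map (fun j => base + i * N + j))
  let rotated : List (List Int) :=
    if which == "CW" then
      -- [[row[r] for row in reversed(grid)] for r in range(N)]; row[r] is always in range on this square grid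
      (PySem.List.pyRange 0 N 1).map (fun r => grid.reverse.map (fun row => PySem.List.pyGetD row r 0))
    else if which == "CCW" then
      -- [[row[N-1-r] for row in grid] for r in range(N)]
      (PySem.List.pyRange 0 N 1).map (fun r => grid.map (fun row => PySem.List.pyGetD row (N - 1 - r) 0))
    else
      -- [row[::-1] for row in reversed(grid)]
      grid.reverse.map (fun row => row.reverse)
  (PySem.List.enumerate rotated 0).foldl (fun P rrow =>
    (PySem.List.enumerate rrow.2 0).foldl (fun P cv =>
      PySem.List.pySetD P (base + rrow.1 * N + cv.1) cv.2) P)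
    (PySem.List.pyRange 0 M 1)

-- ===== PRECONDITION & SPEC =====
-- Pre_ is exactly where Python A returns: for N ≥ 1 a face index f outside [-5, 6] makes A's
-- write P[dst] = src hit an index below -6*N*N or at/above 6*N*N — an IndexError.
def Pre_rotate_face_perm (f : Int) (which : String) (N : Int) : Prop :=
  N ≤ 0 ∨ (-5 ≤ f ∧ f ≤ 6)
instance (f : Int) (which : String) (N : Int) : Decidable (Pre_rotate_face_perm f which N) := by
  unfold Pre_rotate_face_perm; infer_instance

def pvWitness_rotate_face_perm : Int × String × Int := (2, "CW", 2)

def Spec_rotate_face_perm (f : Int) (which : String) (N : Int) (out : List Int) : Prop := out = rotate_face_perm_alt f which N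
instance (f : Int) (which : String) (N : Int) (out : List Int) : Decidable (Spec_rotate_face_perm f which N out) := by unfold Spec_rotate_face_perm; infer_instance

-- ===== CLAIM (what is proved, stated in full; the proofs are below) =====
def Claim_equal_rotate_face_perm : Prop := ∀ (f : Int) (which : String) (N : Int), Dom_rotate_face_perm f which N → Pre_rotate_face_perm f which N → Spec_rotate_face_perm f which N (rotate_face_perm f which N)

-- ===== LEMMAS AND PROOFS =====

-- the common write step: P[pr.1] = pr.2
def pvStep (P : List Int) (pr : Int × Int) : List Int := PySem.List.pySetD P pr.1 pr.2

-- linear position of cell (r, c) inside the face block starting at `base` (n = side length)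
def pvPos (base : Int) (n r c : Nat) : Int := base + (r : Int) * (n : Int) + (c : Int)

-- the writes (position, value) a face rotation performs, destination cell (ρ i j, γ i j)
def pvWrites (base : Int) (n : Nat) (ρ γ : Nat → Nat → Nat) (val : Nat → Nat → Int) : List (Int × Int) :=
  (List.range n).flatMap (fun i => (List.range n).map (fun j => (pvPos base n (ρ i j) (γ i j), val i j)))

lemma pvPos_inj {base : Int} {n r c r' c' : Nat} (hc : c < n) (hc' : c' < n)
    (h : pvPos base n r c = pvPos base n r' c') : r = r' ∧ c = c' := by
  unfold pvPos at h
  have h2 : r * n + c = r' * n + c' := by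
    have h3 : ((r * n + c : Nat) : Int) = ((r' * n + c' : Nat) : Int) := by push_cast; linarith
    exact_mod_cast h3
  have hr : r = r' := by
    have e1 : (r * n + c) / n = r := by
      rw [Nat.mul_comm r n, Nat.mul_add_div (by omega)]; simp [Nat.div_eq_of_lt hc]
    have e2 : (r' * n + c') / n = r' := by
      rw [Nat.mul_comm r' n, Nat.mul_add_div (by omega)]; simp [Nat.div_eq_of_lt hc']
    rw [← e1, ← e2, h2]
  refine ⟨hr, ?_⟩
  subst hr
  omega

lemma pvPos_bounds {base : Int} {n r c : Nat} (hr : r < n) (hc : c < n) :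
    base ≤ pvPos base n r c ∧ pvPos base n r c < base + (n : Int) * (n : Int) := by
  unfold pvPos
  have h0 : (0 : Int) ≤ (r : Int) * (n : Int) + (c : Int) := by positivity
  have hlt : ((r * n + c : Nat) : Int) < ((n * n : Nat) : Int) := by
    exact_mod_cast (by nlinarith : r * n + c < n * n)
  push_cast at hlt
  constructor <;> linarith

-- two in-place writes at distinct indices of the same sign commute (Python index semantics)
lemma pvSetD_comm (z : List Int) {p q : Int} (v w : Int)
    (h : (0 ≤ p ∧ 0 ≤ q) ∨ (p < 0 ∧ q < 0)) (hne : p ≠ q) :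
    PySem.List.pySetD (PySem.List.pySetD z p v) q w
      = PySem.List.pySetD (PySem.List.pySetD z q w) p v := by
  simp only [PySem.List.pySetD, PySem.List.pySet?, PySem.List.pyIdx?]
  rcases h with ⟨hp, hq⟩ | ⟨hp, hq⟩ <;>
    split_ifs <;>
    simp_all [List.length_set] <;>
    (try (apply List.set_comm ; omega)) <;> omega

lemma pvNested' (d s : Nat → Nat → Int) (n : Nat) (init : List Int) :
    (List.range n).foldl (fun P ki => (List.range n).foldl
        (fun P kj => PySem.List.pySetD P (d ki kj) (s ki kj)) P) init
      = ((List.range n).flatMap (fun i => (List.range n).map (fun j => (d i j, s i j)))).foldl pvStep init := by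
  rw [List.foldl_flatMap]
  simp only [List.foldl_map, pvStep]

lemma pvEnumerate_map_range {α : Type} (h : Nat → α) (n : Nat) :
    PySem.List.enumerate ((List.range n).map h) 0 = (List.range n).map (fun k => ((k : Int), h k) : Nat → Int × α) := by
  apply List.ext_getElem
  · simp [PySem.List.length_enumerate]
  · intro k h1 h2
    simp [PySem.List.getElem_enumerate]

lemma pvReverse_map_range {α : Type} (h : Nat → α) (n : Nat) :
    ((List.range n).map h).reverse = (List.range n).map (fun m => h (n - 1 - m)) := by
  apply List.ext_getElem
  · simp
  · intro k h1 h2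
    simp only [List.getElem_reverse, List.getElem_map, List.getElem_range, List.length_map,
      List.length_range]

lemma pvMem_writes {base : Int} {n : Nat} {ρ γ : Nat → Nat → Nat} {val : Nat → Nat → Int}
    {x : Int × Int} : x ∈ pvWrites base n ρ γ val ↔
      ∃ i j, i < n ∧ j < n ∧ x = (pvPos base n (ρ i j) (γ i j), val i j) := by
  unfold pvWrites
  simp only [List.mem_flatMap, List.mem_map, List.mem_range]
  constructor
  · rintro ⟨i, hi, j, hj, rfl⟩; exact ⟨i, j, hi, hj, rfl⟩
  · rintro ⟨i, j, hi, hj, rfl⟩; exact ⟨i, hi, j, hj, rfl⟩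

lemma pvWrites_nodup (base : Int) (n : Nat) (ρ γ : Nat → Nat → Nat) (val : Nat → Nat → Int)
    (hb : ∀ i j, i < n → j < n → ρ i j < n ∧ γ i j < n)
    (hinj : ∀ i j i' j', i < n → j < n → i' < n → j' < n →
      ρ i j = ρ i' j' → γ i j = γ i' j' → i = i' ∧ j = j') :
    (pvWrites base n ρ γ val).Nodup := by
  unfold pvWrites
  rw [List.nodup_flatMap]
  constructor
  · intro i hi
    simp only [List.mem_range] at hi
    apply List.Nodup.map_on _ (List.nodup_range)
    intro j hj j' hj' hpair
    simp only [List.mem_range] at hj hj'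
    have h1 := congrArg Prod.fst hpair
    simp only at h1
    have h2 := pvPos_inj (hb i j hi hj).2 (hb i j' hi hj').2 h1
    exact (hinj i j i j' hi hj hi hj' h2.1 h2.2).2
  · apply List.Pairwise.imp_of_mem _ (List.pairwise_lt_range)
    intro i i' hi hi' hlt
    simp only [List.mem_range] at hi hi'
    intro x hx hx'
    simp only [List.mem_map, List.mem_range] at hx hx'
    obtain ⟨j, hj, rfl⟩ := hx
    obtain ⟨j', hj', hx'⟩ := hx'
    have h1 := congrArg Prod.fst hx'
    simp only at h1
    have h2 := pvPos_inj (hb i' j' hi' hj').2 (hb i j hi hj).2 h1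
    have := (hinj i' j' i j hi' hj' hi hj h2.1 h2.2).1
    omega

lemma pvWrites_perm (base : Int) (n : Nat) (ρ γ ι κ : Nat → Nat → Nat) (val : Nat → Nat → Int)
    (hfwd : ∀ i j, i < n → j < n → ρ i j < n ∧ γ i j < n ∧ ι (ρ i j) (γ i j) = i ∧ κ (ρ i j) (γ i j) = j)
    (hbwd : ∀ r c, r < n → c < n → ι r c < n ∧ κ r c < n ∧ ρ (ι r c) (κ r c) = r ∧ γ (ι r c) (κ r c) = c) :
    List.Perm (pvWrites base n ρ γ val)
      (pvWrites base n (fun r _ => r) (fun _ c => c) (fun r c => val (ι r c) (κ r c))) := by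
  apply List.perm_of_nodup_nodup_toFinset_eq
  · apply pvWrites_nodup _ _ _ _ _ (fun i j hi hj => ⟨(hfwd i j hi hj).1, (hfwd i j hi hj).2.1⟩)
    intro i j i' j' hi hj hi' hj' h1 h2
    have a1 := hfwd i j hi hj
    have a2 := hfwd i' j' hi' hj'
    constructor
    · rw [← a1.2.2.1, ← a2.2.2.1, h1, h2]
    · rw [← a1.2.2.2, ← a2.2.2.2, h1, h2]
  · apply pvWrites_nodup _ _ _ _ _ (fun i j hi hj => ⟨hi, hj⟩)
    intro i j i' j' _ _ _ _ h1 h2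
    exact ⟨h1, h2⟩
  · ext x
    simp only [List.mem_toFinset, pvMem_writes]
    constructor
    · rintro ⟨i, j, hi, hj, rfl⟩
      obtain ⟨b1, b2, b3, b4⟩ := hfwd i j hi hj
      exact ⟨ρ i j, γ i j, b1, b2, by rw [b3, b4]⟩
    · rintro ⟨r, c, hr, hc, rfl⟩
      obtain ⟨b1, b2, b3, b4⟩ := hbwd r c hr hc
      exact ⟨ι r c, κ r c, b1, b2, by rw [b3, b4]⟩

lemma pvWrites_foldl_eq (base : Int) (n : Nat) (ρ γ ι κ : Nat → Nat → Nat) (val : Nat → Nat → Int)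
    (hsgn : 0 ≤ base ∨ base + (n : Int) * (n : Int) ≤ 0)
    (hfwd : ∀ i j, i < n → j < n → ρ i j < n ∧ γ i j < n ∧ ι (ρ i j) (γ i j) = i ∧ κ (ρ i j) (γ i j) = j)
    (hbwd : ∀ r c, r < n → c < n → ι r c < n ∧ κ r c < n ∧ ρ (ι r c) (κ r c) = r ∧ γ (ι r c) (κ r c) = c)
    (init : List Int) :
    (pvWrites base n ρ γ val).foldl pvStep init
      = (pvWrites base n (fun r _ => r) (fun _ c => c) (fun r c => val (ι r c) (κ r c))).foldl pvStep init := by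
  apply List.Perm.foldl_eq' (pvWrites_perm base n ρ γ ι κ val hfwd hbwd)
  intro x hx y hy z
  rw [pvMem_writes] at hx hy
  obtain ⟨i, j, hi, hj, rfl⟩ := hx
  obtain ⟨i', j', hi', hj', rfl⟩ := hy
  by_cases hpq : pvPos base n (ρ i j) (γ i j) = pvPos base n (ρ i' j') (γ i' j')
  · have a1 := hfwd i j hi hj
    have a2 := hfwd i' j' hi' hj'
    have h2 := pvPos_inj a1.2.1 a2.2.1 hpq
    have hii : i = i' := by rw [← a1.2.2.1, ← a2.2.2.1, h2.1, h2.2]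
    have hjj : j = j' := by rw [← a1.2.2.2, ← a2.2.2.2, h2.1, h2.2]
    subst hii; subst hjj
    rw [hpq]
  · have a1 := hfwd i j hi hj
    have a2 := hfwd i' j' hi' hj'
    have b1 := pvPos_bounds a1.1 a1.2.1 (base := base)
    have b2 := pvPos_bounds a2.1 a2.2.1 (base := base)
    simp only [pvStep]
    apply pvSetD_comm
    · rcases hsgn with h | h
      · left; constructor <;> linarith [b1.1, b2.1]
      · right; constructor <;> linarith [b1.2, b2.2]
    · exact hpq

lemma pvRangeA (n : Nat) : PySem.List.pyRange 1 ((n : Int) + 1) 1 = (List.range n).map (fun k : Nat => 1 + (k : Int)) := by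
  have h : ((n : Int) + 1 - 1).toNat = n := by omega
  rw [PySem.List.pyRange_one, h]

-- ==== A's loop as a write list, one lemma per branch of `which` ====

lemma pvA_cw (f : Int) (which : String) (n : Nat) (hw : (which == "CW") = true) :
    rotate_face_perm f which (n : Int)
      = (pvWrites ((f - 1) * (n : Int) * (n : Int)) n (fun _ j => j) (fun i _ => n - 1 - i)
          (fun i j => (f - 1) * (n : Int) * (n : Int) + (i : Int) * (n : Int) + (j : Int))).foldl
          pvStep (PySem.List.pyRange 0 (6 * (n : Int) * (n : Int)) 1) := by
  have h1 : rotate_face_perm f which (n : Int)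
      = ((List.range n).flatMap (fun i : Nat => (List.range n).map (fun j : Nat =>
          (pvID f (1 + (j : Int)) ((n : Int) - (1 + (i : Int)) + 1) (n : Int),
           pvID f (1 + (i : Int)) (1 + (j : Int)) (n : Int))))).foldl
          pvStep (PySem.List.pyRange 0 (6 * (n : Int) * (n : Int)) 1) := by
    simp only [rotate_face_perm, hw, if_true, pvRangeA, List.foldl_map]
    exact pvNested' (fun ki kj => pvID f (1 + (kj : Int)) ((n : Int) - (1 + (ki : Int)) + 1) (n : Int))
      (fun ki kj => pvID f (1 + (ki : Int)) (1 + (kj : Int)) (n : Int)) n _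
  rw [h1]
  congr 1
  apply List.flatMap_congr
  intro i hi
  apply List.map_congr_left
  intro j hj
  simp only [List.mem_range] at hi hj
  have h2 : ((n - 1 - i : Nat) : Int) = (n : Int) - 1 - (i : Int) := by omega
  unfold pvID pvPos
  rw [h2]
  simp only [Prod.mk.injEq]
  constructor <;> ring

lemma pvA_ccw (f : Int) (which : String) (n : Nat) (hw1 : (which == "CW") = false)
    (hw2 : (which == "CCW") = true) :
    rotate_face_perm f which (n : Int)
      = (pvWrites ((f - 1) * (n : Int) * (n : Int)) n (fun _ j => n - 1 - j) (fun i _ => i)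
          (fun i j => (f - 1) * (n : Int) * (n : Int) + (i : Int) * (n : Int) + (j : Int))).foldl
          pvStep (PySem.List.pyRange 0 (6 * (n : Int) * (n : Int)) 1) := by
  have h1 : rotate_face_perm f which (n : Int)
      = ((List.range n).flatMap (fun i : Nat => (List.range n).map (fun j : Nat =>
          (pvID f ((n : Int) - (1 + (j : Int)) + 1) (1 + (i : Int)) (n : Int),
           pvID f (1 + (i : Int)) (1 + (j : Int)) (n : Int))))).foldl
          pvStep (PySem.List.pyRange 0 (6 * (n : Int) * (n : Int)) 1) := by
    simp only [rotate_face_perm, hw1, hw2, if_true, Bool.false_eq_true, if_false, pvRangeA,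
      List.foldl_map]
    exact pvNested' (fun ki kj => pvID f ((n : Int) - (1 + (kj : Int)) + 1) (1 + (ki : Int)) (n : Int))
      (fun ki kj => pvID f (1 + (ki : Int)) (1 + (kj : Int)) (n : Int)) n _
  rw [h1]
  congr 1
  apply List.flatMap_congr
  intro i hi
  apply List.map_congr_left
  intro j hj
  simp only [List.mem_range] at hi hj
  have h2 : ((n - 1 - j : Nat) : Int) = (n : Int) - 1 - (j : Int) := by omega
  unfold pvID pvPos
  rw [h2]
  simp only [Prod.mk.injEq]
  constructor <;> ring

lemma pvA_180 (f : Int) (which : String) (n : Nat) (hw1 : (which == "CW") = false)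
    (hw2 : (which == "CCW") = false) :
    rotate_face_perm f which (n : Int)
      = (pvWrites ((f - 1) * (n : Int) * (n : Int)) n (fun i _ => n - 1 - i) (fun _ j => n - 1 - j)
          (fun i j => (f - 1) * (n : Int) * (n : Int) + (i : Int) * (n : Int) + (j : Int))).foldl
          pvStep (PySem.List.pyRange 0 (6 * (n : Int) * (n : Int)) 1) := by
  have h1 : rotate_face_perm f which (n : Int)
      = ((List.range n).flatMap (fun i : Nat => (List.range n).map (fun j : Nat =>
          (pvID f ((n : Int) - (1 + (i : Int)) + 1) ((n : Int) - (1 + (j : Int)) + 1) (n : Int),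
           pvID f (1 + (i : Int)) (1 + (j : Int)) (n : Int))))).foldl
          pvStep (PySem.List.pyRange 0 (6 * (n : Int) * (n : Int)) 1) := by
    simp only [rotate_face_perm, hw1, hw2, Bool.false_eq_true, if_false, pvRangeA, List.foldl_map]
    exact pvNested' (fun ki kj => pvID f ((n : Int) - (1 + (ki : Int)) + 1) ((n : Int) - (1 + (kj : Int)) + 1) (n : Int))
      (fun ki kj => pvID f (1 + (ki : Int)) (1 + (kj : Int)) (n : Int)) n _
  rw [h1]
  congr 1
  apply List.flatMap_congr
  intro i hi
  apply List.map_congr_left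
  intro j hj
  simp only [List.mem_range] at hi hj
  have h2 : ((n - 1 - i : Nat) : Int) = (n : Int) - 1 - (i : Int) := by omega
  have h3 : ((n - 1 - j : Nat) : Int) = (n : Int) - 1 - (j : Int) := by omega
  unfold pvID pvPos
  rw [h2, h3]
  simp only [Prod.mk.injEq]
  constructor <;> ring

-- ==== B's rotated grid as an explicit table, one lemma per branch ====

lemma pvRotCW (base : Int) (n : Nat) :
    (PySem.List.pyRange 0 (n : Int) 1).map (fun r =>
        (((PySem.List.pyRange 0 (n : Int) 1).map (fun i =>
            (PySem.List.pyRange 0 (n : Int) 1).map (fun j => base + i * (n : Int) + j))).reverse).map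
          (fun row => PySem.List.pyGetD row r 0))
      = (List.range n).map (fun r : Nat => (List.range n).map (fun c : Nat =>
          base + ((n - 1 - c : Nat) : Int) * (n : Int) + (r : Int))) := by
  rw [PySem.List.pyRange_zero_natCast]
  simp only [List.map_map, pvReverse_map_range]
  apply List.map_congr_left
  intro r hr
  simp only [List.mem_range] at hr
  simp only [Function.comp_apply]
  apply List.map_congr_left
  intro c hc
  simp only [List.mem_range] at hc
  simp only [Function.comp_apply, PySem.List.pyGetD_natCast]
  rw [PySem.List.getD_map_range _ n r _ hr]
  rfl

lemma pvRotCCW (base : Int) (n : Nat) :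
    (PySem.List.pyRange 0 (n : Int) 1).map (fun r =>
        ((PySem.List.pyRange 0 (n : Int) 1).map (fun i =>
            (PySem.List.pyRange 0 (n : Int) 1).map (fun j => base + i * (n : Int) + j))).map
          (fun row => PySem.List.pyGetD row ((n : Int) - 1 - r) 0))
      = (List.range n).map (fun r : Nat => (List.range n).map (fun c : Nat =>
          base + (c : Int) * (n : Int) + ((n - 1 - r : Nat) : Int))) := by
  rw [PySem.List.pyRange_zero_natCast]
  simp only [List.map_map]
  apply List.map_congr_left
  intro r hr
  simp only [List.mem_range] at hr
  simp only [Function.comp_apply]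
  apply List.map_congr_left
  intro c hc
  simp only [List.mem_range] at hc
  simp only [Function.comp_apply]
  have h2 : (n : Int) - 1 - (r : Int) = ((n - 1 - r : Nat) : Int) := by omega
  rw [h2, PySem.List.pyGetD_natCast, PySem.List.getD_map_range _ n (n - 1 - r) _ (by omega)]
  rfl

lemma pvRot180 (base : Int) (n : Nat) :
    (((PySem.List.pyRange 0 (n : Int) 1).map (fun i =>
        (PySem.List.pyRange 0 (n : Int) 1).map (fun j => base + i * (n : Int) + j))).reverse).map
      (fun row => row.reverse)
      = (List.range n).map (fun r : Nat => (List.range n).map (fun c : Nat =>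
          base + ((n - 1 - r : Nat) : Int) * (n : Int) + ((n - 1 - c : Nat) : Int))) := by
  rw [PySem.List.pyRange_zero_natCast]
  simp only [List.map_map, pvReverse_map_range]
  apply List.map_congr_left
  intro r hr
  simp only [List.mem_range] at hr
  simp only [Function.comp_apply, pvReverse_map_range]

-- B's enumerate-scatter over any table is the canonical write list
lemma pvB_fold (base M : Int) (n : Nat) (val : Nat → Nat → Int) :
    (PySem.List.enumerate ((List.range n).map (fun r : Nat => (List.range n).map (val r))) 0).foldl
      (fun P rrow => (PySem.List.enumerate rrow.2 0).foldl (fun P cv =>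
        PySem.List.pySetD P (base + rrow.1 * (n : Int) + cv.1) cv.2) P)
      (PySem.List.pyRange 0 M 1)
      = (pvWrites base n (fun r _ => r) (fun _ c => c) val).foldl pvStep
          (PySem.List.pyRange 0 M 1) := by
  rw [pvEnumerate_map_range]
  simp only [List.foldl_map, pvEnumerate_map_range]
  exact pvNested' (fun r c => base + (r : Int) * (n : Int) + (c : Int)) (fun r c => val r c) n _

-- ==== main equality, by cases ====

lemma pvMain (f : Int) (which : String) (N : Int) :
    rotate_face_perm f which N = rotate_face_perm_alt f which N := by
  rcases (em (N ≤ 0)).imp id (fun h => by omega : ¬ N ≤ 0 → 0 < N) with hN | hN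
  · have e1 : PySem.List.pyRange 1 (N + 1) 1 = [] := PySem.List.pyRange_one_eq_nil (by omega)
    have e2 : PySem.List.pyRange 0 N 1 = [] := PySem.List.pyRange_one_eq_nil (by omega)
    simp only [rotate_face_perm, rotate_face_perm_alt, e1, e2, List.foldl_nil, List.map_nil,
      List.reverse_nil]
    split_ifs <;> simp [PySem.List.enumerate]
  · obtain ⟨n, rfl⟩ : ∃ m : Nat, N = (m : Int) := ⟨N.toNat, by omega⟩
    have hsq : (0 : Int) ≤ (n : Int) * (n : Int) := by positivity
    have hsgn : 0 ≤ (f - 1) * (n : Int) * (n : Int) ∨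
        (f - 1) * (n : Int) * (n : Int) + (n : Int) * (n : Int) ≤ 0 := by
      rcases (em (1 ≤ f)).imp id (fun h => by omega : ¬ 1 ≤ f → f ≤ 0) with h | h
      · left; nlinarith
      · right; nlinarith
    by_cases hw1 : (which == "CW") = true
    · rw [pvA_cw f which n hw1]
      have hB : rotate_face_perm_alt f which (n : Int)
          = (pvWrites ((f - 1) * (n : Int) * (n : Int)) n (fun r _ => r) (fun _ c => c)
              (fun r c => (f - 1) * (n : Int) * (n : Int) + ((n - 1 - c : Nat) : Int) * (n : Int) + (r : Int))).foldl
              pvStep (PySem.List.pyRange 0 (6 * (n : Int) * (n : Int)) 1) := by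
        simp only [rotate_face_perm_alt, hw1, if_true, pvRotCW]
        exact pvB_fold ((f - 1) * (n : Int) * (n : Int)) (6 * (n : Int) * (n : Int)) n _
      rw [hB]
      exact pvWrites_foldl_eq _ n _ _ (fun _ c => n - 1 - c) (fun r _ => r) _ hsgn
        (by intro i j hi hj; refine ⟨?_, ?_, ?_, ?_⟩ <;> (beta_reduce; omega))
        (by intro r c hr hc; refine ⟨?_, ?_, ?_, ?_⟩ <;> (beta_reduce; omega)) _
    · by_cases hw2 : (which == "CCW") = true
      · have hw1' : (which == "CW") = false := by simp only [Bool.not_eq_true] at hw1; exact hw1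
        rw [pvA_ccw f which n hw1' hw2]
        have hB : rotate_face_perm_alt f which (n : Int)
            = (pvWrites ((f - 1) * (n : Int) * (n : Int)) n (fun r _ => r) (fun _ c => c)
                (fun r c => (f - 1) * (n : Int) * (n : Int) + (c : Int) * (n : Int) + ((n - 1 - r : Nat) : Int))).foldl
                pvStep (PySem.List.pyRange 0 (6 * (n : Int) * (n : Int)) 1) := by
          simp only [rotate_face_perm_alt, hw1', hw2, if_true, Bool.false_eq_true, if_false,
            pvRotCCW]
          exact pvB_fold ((f - 1) * (n : Int) * (n : Int)) (6 * (n : Int) * (n : Int)) n _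
        rw [hB]
        exact pvWrites_foldl_eq _ n _ _ (fun _ c => c) (fun r _ => n - 1 - r) _ hsgn
          (by intro i j hi hj; refine ⟨?_, ?_, ?_, ?_⟩ <;> (beta_reduce; omega))
          (by intro r c hr hc; refine ⟨?_, ?_, ?_, ?_⟩ <;> (beta_reduce; omega)) _
      · have hw1' : (which == "CW") = false := by simp only [Bool.not_eq_true] at hw1; exact hw1
        have hw2' : (which == "CCW") = false := by simp only [Bool.not_eq_true] at hw2; exact hw2
        rw [pvA_180 f which n hw1' hw2']
        have hB : rotate_face_perm_alt f which (n : Int)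
            = (pvWrites ((f - 1) * (n : Int) * (n : Int)) n (fun r _ => r) (fun _ c => c)
                (fun r c => (f - 1) * (n : Int) * (n : Int) + ((n - 1 - r : Nat) : Int) * (n : Int) + ((n - 1 - c : Nat) : Int))).foldl
                pvStep (PySem.List.pyRange 0 (6 * (n : Int) * (n : Int)) 1) := by
          simp only [rotate_face_perm_alt, hw1', hw2', Bool.false_eq_true, if_false, pvRot180]
          exact pvB_fold ((f - 1) * (n : Int) * (n : Int)) (6 * (n : Int) * (n : Int)) n _
        rw [hB]
        exact pvWrites_foldl_eq _ n _ _ (fun r _ => n - 1 - r) (fun _ c => n - 1 - c) _ hsgn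
          (by intro i j hi hj; refine ⟨?_, ?_, ?_, ?_⟩ <;> (beta_reduce; omega))
          (by intro r c hr hc; refine ⟨?_, ?_, ?_, ?_⟩ <;> (beta_reduce; omega)) _

-- ===== VERDICT (by name: the statement is the Claim_ definition above) =====
theorem rotate_face_perm_spec : Claim_equal_rotate_face_perm := by
  intro f which N _ _
  exact pvMain f which N
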